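-- pv_equiv track=rewrite | github.com/ClemBazan/Shortest-Path-in-3D | map.py | tukey
-- ===== SOURCE A (Python) =====
-- def clipping_voisin(matrice: list, i: int, j: int,
--                                                  rayon : int = 1) -> list:
--     """
--
--     Clipping voisin d'un point avec un rayon carré
--
--     --------------
--     |     _______o_____
--     |     | o    |    |
--     |     |(i,j) |    |
--     ------o-------    |
--           |___________|
--
--     Le point courant definit un carré autour de lui,
--     trouver les points d'intersections
--
--     Cas idéal pas d'intersection
--     point haut : (i-rayon, j+rayon)
--
--     point bas : (i+rayon, j-rayon)
--
--
--     """
--     n = len(matrice)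
--     vec = []
--     #Point d'intersection haut
--     diag_haut_x = i - rayon
--     if(diag_haut_x < 0):
--         diag_haut_x = 0
--
--     diag_haut_y = j + rayon
--     if(diag_haut_y >= n):
--         diag_haut_y = n-1
--
--     #Point d'intersection bas
--     diag_bas_x = i + rayon
--     if(diag_bas_x >= n):
--         diag_bas_x = n-1
--
--     diag_bas_y = j - rayon
--     if(diag_bas_y < 0):
--         diag_bas_y = 0
--
--     #On parcours de gauche à droite puis de haut en bas le quadrilatère
--     #formé par les deux points d'intersections
--     for k in range(diag_haut_x, diag_bas_x+1):
--         for l in range(diag_bas_y, diag_haut_y+1):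
--             vec.append(matrice[k][l])
--
--     return vec
--
-- def tukey(matrice: list, rayon : int = 1) -> list:
--     """
--     Renvoie une matrice bruite avec le bruit de tukey
--     possibilite de mettre un rayon
--     """
--     if(rayon <= 0):
--         return matrice
--
--     n = len(matrice)
--
--     #Initialisaton d'un matrice receptrice
--     mat_median = [[0 for x in range(n)] for y in range (n)]
--
--
--     for i in range(n):
--         for j in range(n):
--             mat_median[i][j] = median(clipping_voisin(matrice, i, j, rayon))
--
--
--     return mat_median
--
-- def median(vec: list) -> int:
--     """
--     Renvoie la valeur médiane d'une liste de données
--     """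
--     n = len(vec)
--     vec.sort()
--
--     #Verification de la parité
--     if n&1:
--         return vec[n//2]
--
--     else:
--         return ((vec[n//2-1] + vec[n//2]) // 2)
-- ===== SOURCE B (Python) =====
-- def _insert_sorted(win, x):
--     k = 0
--     while k < len(win) and win[k] < x:
--         k += 1
--     return win[:k] + [x] + win[k:]
--
--
-- def _remove_first(win, x):
--     k = 0
--     while k < len(win) and win[k] != x:
--         k += 1
--     return win[:k] + win[k + 1:]
--
--
-- def _median_of_sorted(win):
--     m = len(win)
--     if m % 2 == 1:
--         return win[m // 2]
--     return (win[m // 2 - 1] + win[m // 2]) // 2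
--
--
-- def _row(matrice, rayon, n, i):
--     # One output row by a sliding window: keep the window's values sorted and
--     # update incrementally as j advances (drop the leaving column, insert the
--     # entering one); the median is read directly from the sorted list.
--     ks = range(max(0, i - rayon), min(n - 1, i + rayon) + 1)
--     win = sorted(matrice[k][l] for k in ks
--                  for l in range(0, min(n - 1, rayon) + 1))
--     row = []
--     for j in range(n):
--         if j > 0:
--             if 0 <= j - 1 - rayon:
--                 for k in ks:
--                     win = _remove_first(win, matrice[k][j - 1 - rayon])
--             if j + rayon <= n - 1:
--                 for k in ks:
--                     win = _insert_sorted(win, matrice[k][j + rayon])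
--         row.append(_median_of_sorted(win))
--     return row
--
--
-- def tukey(matrice, rayon=1):
--     if rayon <= 0:
--         return matrice
--     n = len(matrice)
--     return [_row(matrice, rayon, n, i) for i in range(n)]
-- ===== Notes on version B (the rewrite author's own statement) =====
-- stated objective: alternative
-- what changed: B replaces A's per-cell re-collection of the clipped window and a fresh sort (via the clipping helper and median) by a sliding-window median: for each row band it keeps one sorted list of the window's values and updates it incrementally as the column advances, removing the leaving column's values and inserting the entering column's values into the sorted list, reading the median directly from it.
import Mathlib
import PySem

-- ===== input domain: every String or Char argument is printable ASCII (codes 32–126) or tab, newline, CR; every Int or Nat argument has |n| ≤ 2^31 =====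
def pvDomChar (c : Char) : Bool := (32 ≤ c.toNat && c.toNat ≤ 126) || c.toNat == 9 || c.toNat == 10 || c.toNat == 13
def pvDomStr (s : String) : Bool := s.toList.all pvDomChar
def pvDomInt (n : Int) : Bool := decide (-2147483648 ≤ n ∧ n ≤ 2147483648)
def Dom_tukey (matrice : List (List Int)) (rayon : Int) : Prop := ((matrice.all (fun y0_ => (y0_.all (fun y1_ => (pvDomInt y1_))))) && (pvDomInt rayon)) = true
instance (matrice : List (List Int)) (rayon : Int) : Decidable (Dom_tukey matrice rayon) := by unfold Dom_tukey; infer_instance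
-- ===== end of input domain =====

-- B replaces A's per-cell window re-collection and re-sort by a sliding-window median:
-- per row band one sorted list is kept and updated incrementally (remove the leaving
-- column, insert the entering one); alternative algorithm, not claimed faster.

-- ===== PORT A =====
-- median: vec.sort() then parity test 'n & 1'; vec[n//2] etc. (indices in range whenever
-- vec ≠ [], the only way tukey calls it; pyGetD's default is never read there)
def pvMedianA (vec : List Int) : Int :=
  let n : Int := (vec.length : Int)
  let v := PySem.List.sorted vec (fun x => x) false
  if PySem.Int.band n 1 ≠ 0 then
    PySem.List.pyGetD v (PySem.Int.floordiv n 2) 0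
  else
    PySem.Int.floordiv
      (PySem.List.pyGetD v (PySem.Int.floordiv n 2 - 1) 0 +
       PySem.List.pyGetD v (PySem.Int.floordiv n 2) 0) 2

def pvClippingVoisin (matrice : List (List Int)) (i j rayon : Int) : List Int :=
  let n : Int := (matrice.length : Int)
  let diag_haut_x := if i - rayon < 0 then 0 else i - rayon
  let diag_haut_y := if j + rayon ≥ n then n - 1 else j + rayon
  let diag_bas_x := if i + rayon ≥ n then n - 1 else i + rayon
  let diag_bas_y := if j - rayon < 0 then 0 else j - rayon
  (PySem.List.pyRange diag_haut_x (diag_bas_x + 1) 1).foldl (fun vec k =>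
    (PySem.List.pyRange diag_bas_y (diag_haut_y + 1) 1).foldl (fun vec l =>
      vec ++ [PySem.List.pyGetD (PySem.List.pyGetD matrice k []) l 0]) vec) []

def tukey (matrice : List (List Int)) (rayon : Int) : List (List Int) :=
  if rayon ≤ 0 then matrice
  else
    let n : Int := (matrice.length : Int)
    -- mat_median = [[0 for x in range(n)] for y in range(n)], then each cell assigned
    let mat0 := (PySem.List.pyRange 0 n 1).map (fun _ => (PySem.List.pyRange 0 n 1).map (fun _ => (0 : Int)))
    (PySem.List.pyRange 0 n 1).foldl (fun mat i =>
      (PySem.List.pyRange 0 n 1).foldl (fun mat j =>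
        mat.set i.toNat ((mat.getD i.toNat []).set j.toNat
          (pvMedianA (pvClippingVoisin matrice i j rayon)))) mat) mat0

-- ===== PORT B =====
-- _insert_sorted: scan for the first position not below x, splice x in
def pvInsertSorted (win : List Int) (x : Int) : List Int :=
  win.takeWhile (fun y => decide (y < x)) ++ x :: win.dropWhile (fun y => decide (y < x))

-- _remove_first: scan for the first occurrence of x, splice it out (win unchanged if absent)
def pvRemoveFirst (win : List Int) (x : Int) : List Int :=
  win.takeWhile (fun y => decide (y ≠ x)) ++ (win.dropWhile (fun y => decide (y ≠ x))).drop 1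

def pvMedSorted (win : List Int) : Int :=
  let m := win.length
  if m % 2 = 1 then win.getD (m / 2) 0
  else PySem.Int.floordiv (win.getD (m / 2 - 1) 0 + win.getD (m / 2) 0) 2

def pvRowAlt (matrice : List (List Int)) (rayon n i : Int) : List Int :=
  let ks := PySem.List.pyRange (max 0 (i - rayon)) (min (n - 1) (i + rayon) + 1) 1
  let win0 := PySem.List.sorted (ks.flatMap (fun k =>
      (PySem.List.pyRange 0 (min (n - 1) rayon + 1) 1).map (fun l =>
        PySem.List.pyGetD (PySem.List.pyGetD matrice k []) l 0))) (fun x => x) false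
  ((PySem.List.pyRange 0 n 1).foldl (fun (st : List Int × List Int) j =>
      let win :=
        if 0 < j then
          let win1 :=
            if 0 ≤ j - 1 - rayon then
              ks.foldl (fun w k => pvRemoveFirst w
                (PySem.List.pyGetD (PySem.List.pyGetD matrice k []) (j - 1 - rayon) 0)) st.1
            else st.1
          if j + rayon ≤ n - 1 then
            ks.foldl (fun w k => pvInsertSorted w
              (PySem.List.pyGetD (PySem.List.pyGetD matrice k []) (j + rayon) 0)) win1
          else win1
        else st.1
      (win, st.2 ++ [pvMedSorted win])) (win0, ([] : List Int))).2

def tukey_alt (matrice : List (List Int)) (rayon : Int) : List (List Int) :=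
  if rayon ≤ 0 then matrice
  else
    (PySem.List.pyRange 0 (matrice.length : Int) 1).map
      (fun i => pvRowAlt matrice rayon (matrice.length : Int) i)

-- ===== PRECONDITION & SPEC =====
-- When rayon ≥ 1, A reads matrice[k][l] for every k,l < len(matrice): a row shorter than the
-- number of rows makes A (and B) raise IndexError; Pre_ excludes exactly those inputs.
def Pre_tukey (matrice : List (List Int)) (rayon : Int) : Prop :=
  rayon ≤ 0 ∨ ∀ row ∈ matrice, matrice.length ≤ row.length
instance (matrice : List (List Int)) (rayon : Int) : Decidable (Pre_tukey matrice rayon) := by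
  unfold Pre_tukey; infer_instance
def pvWitness_tukey : List (List Int) × Int := ([[1, 2], [3, 4]], 1)

def Spec_tukey (matrice : List (List Int)) (rayon : Int) (out : List (List Int)) : Prop := out = tukey_alt matrice rayon
instance (matrice : List (List Int)) (rayon : Int) (out : List (List Int)) : Decidable (Spec_tukey matrice rayon out) := by unfold Spec_tukey; infer_instance

-- ===== CLAIM (what is proved, stated in full; the proofs are below) =====
def Claim_equal_tukey : Prop := ∀ (matrice : List (List Int)) (rayon : Int), Dom_tukey matrice rayon → Pre_tukey matrice rayon → Spec_tukey matrice rayon (tukey matrice rayon)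

-- ===== LEMMAS AND PROOFS =====

-- abbreviations used only by the proofs
def pvKs (n c r : Int) : List Int :=
  PySem.List.pyRange (max 0 (c - r)) (min (n - 1) (c + r) + 1) 1

-- the window of cell (i, j) listed column-major (l outer, k inner)
def pvWinL (mt : List (List Int)) (n i j r : Int) : List Int :=
  (pvKs n j r).flatMap (fun l => (pvKs n i r).map (fun k =>
    PySem.List.pyGetD (PySem.List.pyGetD mt k []) l 0))

-- the canonical sorted window
def pvSW (mt : List (List Int)) (n i j r : Int) : List Int :=
  PySem.List.sorted (pvWinL mt n i j r) (fun x => x) false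

def pvWin0 (mt : List (List Int)) (r n i : Int) : List Int :=
  PySem.List.sorted ((pvKs n i r).flatMap (fun k =>
      (PySem.List.pyRange 0 (min (n - 1) r + 1) 1).map (fun l =>
        PySem.List.pyGetD (PySem.List.pyGetD mt k []) l 0))) (fun x => x) false

def pvUpd (mt : List (List Int)) (r n : Int) (ks : List Int) (j : Int) (w : List Int) : List Int :=
  let win1 :=
    if 0 ≤ j - 1 - r then
      ks.foldl (fun w k => pvRemoveFirst w
        (PySem.List.pyGetD (PySem.List.pyGetD mt k []) (j - 1 - r) 0)) w
    else w
  if j + r ≤ n - 1 then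
    ks.foldl (fun w k => pvInsertSorted w
      (PySem.List.pyGetD (PySem.List.pyGetD mt k []) (j + r) 0)) win1
  else win1

def pvStep (mt : List (List Int)) (r n : Int) (ks : List Int)
    (st : List Int × List Int) (j : Int) : List Int × List Int :=
  let win := if 0 < j then pvUpd mt r n ks j st.1 else st.1
  (win, st.2 ++ [pvMedSorted win])

theorem pvRowAlt_eq (mt : List (List Int)) (r n i : Int) :
    pvRowAlt mt r n i
      = ((PySem.List.pyRange 0 n 1).foldl (pvStep mt r n (pvKs n i r))
          (pvWin0 mt r n i, ([] : List Int))).2 := rfl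

theorem pvStep_zero (mt : List (List Int)) (r n : Int) (ks : List Int)
    (st : List Int × List Int) :
    pvStep mt r n ks st 0 = (st.1, st.2 ++ [pvMedSorted st.1]) := by
  simp [pvStep]

theorem pvStep_pos (mt : List (List Int)) (r n : Int) (ks : List Int)
    (st : List Int × List Int) (j : Int) (hj : 0 < j) :
    pvStep mt r n ks st j
      = (pvUpd mt r n ks j st.1, st.2 ++ [pvMedSorted (pvUpd mt r n ks j st.1)]) := by
  simp [pvStep, hj]

theorem pvInsertSorted_eq (w : List Int) (x : Int) :
    pvInsertSorted w x = List.orderedInsert (· ≤ ·) x w := by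
  induction w with
  | nil => rfl
  | cons y w ih =>
    by_cases h : y < x
    · simp [pvInsertSorted, List.orderedInsert, h, not_le.mpr h] at *
      exact ih
    · simp [pvInsertSorted, List.orderedInsert, h, not_lt.mp h]

theorem pvRemoveFirst_eq (w : List Int) (x : Int) :
    pvRemoveFirst w x = w.erase x := by
  induction w with
  | nil => rfl
  | cons y w ih =>
    by_cases h : y = x
    · simp [pvRemoveFirst, h]
    · simp [pvRemoveFirst, h] at *
      exact ih

theorem pvPermFlatMapCons {β γ : Type} (bs : List β) (g : β → γ) (h : β → List γ) :
    (bs.flatMap (fun b => g b :: h b)).Perm (bs.map g ++ bs.flatMap h) := by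
  induction bs with
  | nil => simp
  | cons b bs ih =>
    simp only [List.flatMap_cons, List.map_cons, List.cons_append]
    exact List.Perm.cons _
      ((ih.append_left _).trans (List.perm_append_comm_assoc _ _ _))

theorem pvPermSwap {α β γ : Type} (as : List α) (bs : List β) (f : α → β → γ) :
    (as.flatMap (fun a => bs.map (f a))).Perm
      (bs.flatMap (fun b => as.map (fun a => f a b))) := by
  induction as with
  | nil => simp
  | cons a as ih =>
    simp only [List.flatMap_cons, List.map_cons]
    exact (ih.append_left _).trans (pvPermFlatMapCons bs (f a) _).symm

theorem pvRemoveFold (ks : List Int) (g : Int → Int) :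
    ∀ (w rest : List Int), w.Pairwise (· ≤ ·) → w.Perm (ks.map g ++ rest) →
      ((ks.foldl (fun w k => pvRemoveFirst w (g k)) w).Pairwise (· ≤ ·) ∧
       (ks.foldl (fun w k => pvRemoveFirst w (g k)) w).Perm rest) := by
  induction ks with
  | nil => intro w rest hpw hperm; exact ⟨hpw, by simpa using hperm⟩
  | cons k ks ih =>
    intro w rest hpw hperm
    simp only [List.foldl_cons, List.map_cons, List.cons_append] at *
    rw [pvRemoveFirst_eq]
    have h1 : (w.erase (g k)).Perm (ks.map g ++ rest) := by
      have := hperm.erase (g k)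
      rwa [List.erase_cons_head] at this
    exact ih _ rest (hpw.sublist (List.erase_sublist ..)) h1

theorem pvInsertFold (ks : List Int) (g : Int → Int) :
    ∀ (w : List Int), w.Pairwise (· ≤ ·) →
      ((ks.foldl (fun w k => pvInsertSorted w (g k)) w).Pairwise (· ≤ ·) ∧
       (ks.foldl (fun w k => pvInsertSorted w (g k)) w).Perm (ks.map g ++ w)) := by
  induction ks with
  | nil => intro w hpw; exact ⟨hpw, by simp⟩
  | cons k ks ih =>
    intro w hpw
    simp only [List.foldl_cons, List.map_cons, List.cons_append]
    rw [pvInsertSorted_eq]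
    have hs : (List.orderedInsert (· ≤ ·) (g k) w).Pairwise (· ≤ ·) :=
      List.Pairwise.orderedInsert (g k) w hpw
    obtain ⟨hp2, hperm⟩ := ih _ hs
    exact ⟨hp2, hperm.trans
      (((List.perm_orderedInsert _ _ _).append_left _).trans List.perm_middle)⟩

theorem pvMedianA_eq_medSorted (vec w : List Int)
    (hpw : w.Pairwise (· ≤ ·)) (hperm : w.Perm vec) :
    pvMedianA vec = pvMedSorted w := by
  unfold pvMedianA pvMedSorted
  have hw : PySem.List.sorted vec (fun x => x) false = w :=
    PySem.List.sorted_id_eq_of_perm_of_pairwise vec w hperm hpw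
  have hlen : w.length = vec.length := hperm.length_eq
  simp only [hw, PySem.Int.band_one]
  have hmod : PySem.Int.mod ((vec.length : Int)) 2 = ((vec.length % 2 : Nat) : Int) := by
    exact_mod_cast PySem.Int.mod_natCast vec.length 2
  have hdiv : PySem.Int.floordiv ((vec.length : Int)) 2 = ((vec.length / 2 : Nat) : Int) := by
    exact_mod_cast PySem.Int.floordiv_natCast vec.length 2
  rw [hmod, hdiv]
  by_cases hpar : vec.length % 2 = 1
  · rw [if_pos (by rw [hpar]; norm_num : ((↑(vec.length % 2) : Int) ≠ 0)),
      if_pos (by rw [hlen, hpar]), PySem.List.pyGetD_natCast, hlen]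
  · rw [if_neg (by omega), if_neg (by rw [hlen]; exact hpar)]
    rcases Nat.eq_zero_or_pos vec.length with h0 | hpos
    · have hwnil : w = [] := List.eq_nil_of_length_eq_zero (by omega)
      rw [hwnil, h0]
      decide
    · have h2 : 2 ≤ vec.length := by omega
      have hcast : ((vec.length / 2 : Nat) : Int) - 1 = ((vec.length / 2 - 1 : Nat) : Int) := by
        have : 1 ≤ vec.length / 2 := by omega
        omega
      rw [hcast, PySem.List.pyGetD_natCast, PySem.List.pyGetD_natCast, hlen]

theorem pvClip_eq (mt : List (List Int)) (i j r : Int) :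
    pvClippingVoisin mt i j r
      = (pvKs (mt.length : Int) i r).flatMap
          (fun k => (pvKs (mt.length : Int) j r).map (fun l =>
            PySem.List.pyGetD (PySem.List.pyGetD mt k []) l 0)) := by
  unfold pvClippingVoisin pvKs
  simp only [PySem.List.foldl_append_singleton_eq_map, PySem.List.foldl_append_eq_flatMap,
    List.nil_append]
  rw [show (if i - r < 0 then 0 else i - r) = max 0 (i - r) from by split_ifs <;> omega,
    show (if i + r ≥ (mt.length : Int) then (mt.length : Int) - 1 else i + r)
        = min ((mt.length : Int) - 1) (i + r) from by split_ifs <;> omega,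
    show (if j - r < 0 then 0 else j - r) = max 0 (j - r) from by split_ifs <;> omega,
    show (if j + r ≥ (mt.length : Int) then (mt.length : Int) - 1 else j + r)
        = min ((mt.length : Int) - 1) (j + r) from by split_ifs <;> omega]

theorem pvWin0_eq (mt : List (List Int)) (r n i : Int) (hr : 1 ≤ r) :
    pvWin0 mt r n i = pvSW mt n i 0 r := by
  unfold pvWin0 pvSW
  apply (PySem.List.sorted_eq_sorted_of_perm _ _ _ (fun _ _ h => h) _).symm
  unfold pvWinL
  rw [show pvKs n 0 r = PySem.List.pyRange 0 (min (n - 1) r + 1) 1 from by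
    unfold pvKs
    rw [show max 0 (0 - r) = 0 from by omega, show (0 : Int) + r = r from by ring]]
  exact (pvPermSwap _ _ _).symm

-- sliding-window step: the updated list stays sorted and is a permutation of the next window
theorem pvStepWin (mt : List (List Int)) (r i j : Int) (hr : 1 ≤ r) (hj : 1 ≤ j)
    (hjn : j < (mt.length : Int)) (w : List Int)
    (hpw : w.Pairwise (· ≤ ·))
    (hperm : w.Perm (pvWinL mt (mt.length : Int) i (j - 1) r)) :
    (pvUpd mt r (mt.length : Int) (pvKs (mt.length : Int) i r) j w).Pairwise (· ≤ ·) ∧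
    (pvUpd mt r (mt.length : Int) (pvKs (mt.length : Int) i r) j w).Perm
      (pvWinL mt (mt.length : Int) i j r) := by
  have hn0 : (0 : Int) ≤ (mt.length : Int) := Int.natCast_nonneg _
  unfold pvUpd
  by_cases h1 : 0 ≤ j - 1 - r
  · have hcons : pvKs (mt.length : Int) (j - 1) r
        = (j - 1 - r) :: PySem.List.pyRange (j - r)
            (min ((mt.length : Int) - 1) (j - 1 + r) + 1) 1 := by
      unfold pvKs
      rw [show max 0 (j - 1 - r) = j - 1 - r from by omega,
        PySem.List.pyRange_one_cons (by omega),
        show j - 1 - r + 1 = j - r from by ring]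
    have hdec : pvWinL mt (mt.length : Int) i (j - 1) r
        = (pvKs (mt.length : Int) i r).map (fun k =>
            PySem.List.pyGetD (PySem.List.pyGetD mt k []) (j - 1 - r) 0)
          ++ (PySem.List.pyRange (j - r) (min ((mt.length : Int) - 1) (j - 1 + r) + 1) 1).flatMap
              (fun l => (pvKs (mt.length : Int) i r).map (fun k =>
                PySem.List.pyGetD (PySem.List.pyGetD mt k []) l 0)) := by
      unfold pvWinL
      rw [hcons, List.flatMap_cons]
    have hperm1 : w.Perm
        ((pvKs (mt.length : Int) i r).map (fun k =>
            PySem.List.pyGetD (PySem.List.pyGetD mt k []) (j - 1 - r) 0)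
          ++ (PySem.List.pyRange (j - r) (min ((mt.length : Int) - 1) (j - 1 + r) + 1) 1).flatMap
              (fun l => (pvKs (mt.length : Int) i r).map (fun k =>
                PySem.List.pyGetD (PySem.List.pyGetD mt k []) l 0))) := by
      rw [← hdec]; exact hperm
    obtain ⟨hp1, hq1⟩ := pvRemoveFold (pvKs (mt.length : Int) i r)
      (fun k => PySem.List.pyGetD (PySem.List.pyGetD mt k []) (j - 1 - r) 0) w _ hpw hperm1
    rw [if_pos h1]
    by_cases h2 : j + r ≤ (mt.length : Int) - 1
    · obtain ⟨hp2, hq2⟩ := pvInsertFold (pvKs (mt.length : Int) i r)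
        (fun k => PySem.List.pyGetD (PySem.List.pyGetD mt k []) (j + r) 0) _ hp1
      rw [if_pos h2]
      refine ⟨hp2, hq2.trans ?_⟩
      have hdec2 : pvWinL mt (mt.length : Int) i j r
          = (PySem.List.pyRange (j - r) (min ((mt.length : Int) - 1) (j - 1 + r) + 1) 1).flatMap
              (fun l => (pvKs (mt.length : Int) i r).map (fun k =>
                PySem.List.pyGetD (PySem.List.pyGetD mt k []) l 0))
            ++ (pvKs (mt.length : Int) i r).map (fun k =>
                PySem.List.pyGetD (PySem.List.pyGetD mt k []) (j + r) 0) := by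
        unfold pvWinL
        rw [show pvKs (mt.length : Int) j r
            = PySem.List.pyRange (j - r) (min ((mt.length : Int) - 1) (j - 1 + r) + 1) 1
              ++ [j + r] from by
          unfold pvKs
          rw [show min ((mt.length : Int) - 1) (j + r) + 1 = (j + r) + 1 from by omega,
            PySem.List.pyRange_one_succ_right (by omega)]
          congr 1
          congr 1 <;> omega]
        rw [List.flatMap_append]
        simp
      rw [hdec2]
      exact (hq1.append_left _).trans List.perm_append_comm
    · rw [if_neg h2]
      refine ⟨hp1, ?_⟩
      have heq : pvWinL mt (mt.length : Int) i j r
          = (PySem.List.pyRange (j - r) (min ((mt.length : Int) - 1) (j - 1 + r) + 1) 1).flatMap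
              (fun l => (pvKs (mt.length : Int) i r).map (fun k =>
                PySem.List.pyGetD (PySem.List.pyGetD mt k []) l 0)) := by
        unfold pvWinL
        congr 1
        unfold pvKs
        congr 1 <;> omega
      rw [heq]
      exact hq1
  · rw [if_neg h1]
    by_cases h2 : j + r ≤ (mt.length : Int) - 1
    · obtain ⟨hp2, hq2⟩ := pvInsertFold (pvKs (mt.length : Int) i r)
        (fun k => PySem.List.pyGetD (PySem.List.pyGetD mt k []) (j + r) 0) w hpw
      rw [if_pos h2]
      refine ⟨hp2, hq2.trans ?_⟩
      have hdec2 : pvWinL mt (mt.length : Int) i j r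
          = pvWinL mt (mt.length : Int) i (j - 1) r
            ++ (pvKs (mt.length : Int) i r).map (fun k =>
                PySem.List.pyGetD (PySem.List.pyGetD mt k []) (j + r) 0) := by
        unfold pvWinL
        rw [show pvKs (mt.length : Int) j r = pvKs (mt.length : Int) (j - 1) r ++ [j + r] from by
          unfold pvKs
          rw [show min ((mt.length : Int) - 1) (j + r) + 1 = (j + r) + 1 from by omega,
            PySem.List.pyRange_one_succ_right (by omega)]
          congr 1
          congr 1 <;> omega]
        rw [List.flatMap_append]
        simp
      rw [hdec2]
      exact (hperm.append_left _).trans List.perm_append_comm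
    · rw [if_neg h2]
      have heq : pvWinL mt (mt.length : Int) i j r = pvWinL mt (mt.length : Int) i (j - 1) r := by
        unfold pvWinL
        congr 1
        unfold pvKs
        congr 1 <;> omega
      rw [heq]
      exact ⟨hpw, hperm⟩

-- fold invariant for the inner loop of B's row computation
theorem pvInnerInv (mt : List (List Int)) (r i : Int) (hr : 1 ≤ r) :
    ∀ (M : Nat), (M : Int) ≤ (mt.length : Int) →
      (PySem.List.pyRange 0 (M : Int) 1).foldl
          (pvStep mt r (mt.length : Int) (pvKs (mt.length : Int) i r))
          (pvWin0 mt r (mt.length : Int) i, ([] : List Int))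
        = ((if M = 0 then pvWin0 mt r (mt.length : Int) i
            else pvSW mt (mt.length : Int) i ((M : Int) - 1) r),
           (PySem.List.pyRange 0 (M : Int) 1).map
             (fun j => pvMedSorted (pvSW mt (mt.length : Int) i j r))) := by
  intro M
  induction M with
  | zero => intro _; simp [PySem.List.pyRange_one_eq_nil]
  | succ M ih =>
    intro hM
    have hcast : ((M + 1 : Nat) : Int) = (M : Int) + 1 := by push_cast; ring
    have hM' : (M : Int) ≤ (mt.length : Int) := by omega
    rw [hcast, PySem.List.pyRange_one_succ_right (by positivity), List.foldl_append,
      List.map_append, ih hM']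
    simp only [List.foldl_cons, List.foldl_nil, List.map_cons, List.map_nil]
    rcases Nat.eq_zero_or_pos M with h0 | hMpos
    · subst h0
      simp only [Nat.cast_zero]
      rw [pvStep_zero]
      rw [pvWin0_eq mt r (mt.length : Int) i hr]
      norm_num
    · have hjpos : (0 : Int) < (M : Int) := by exact_mod_cast hMpos
      rw [if_neg (by omega)]
      rw [pvStep_pos _ _ _ _ _ _ hjpos]
      obtain ⟨hp, hq⟩ := pvStepWin mt r i (M : Int) hr (by omega) (by omega)
        (pvSW mt (mt.length : Int) i ((M : Int) - 1) r)
        (by simpa using PySem.List.sorted_pairwise (pvWinL mt (mt.length : Int) i ((M : Int) - 1) r) (fun x => x))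
        (PySem.List.sorted_perm _ _ _)
      have hsw : pvSW mt (mt.length : Int) i (M : Int) r
          = pvUpd mt r (mt.length : Int) (pvKs (mt.length : Int) i r) (M : Int)
              (pvSW mt (mt.length : Int) i ((M : Int) - 1) r) :=
        PySem.List.sorted_id_eq_of_perm_of_pairwise _ _ hq hp
      dsimp only
      rw [if_neg (Nat.succ_ne_zero M), show (M : Int) + 1 - 1 = (M : Int) from by ring, ← hsw]

-- A's matrix-assignment fold as a map
theorem pvFoldlSetRange {α : Type} (N : Nat) (v : Int → α) :
    ∀ (M : Nat), M ≤ N → ∀ (l : List α), l.length = N →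
      (PySem.List.pyRange 0 (M : Int) 1).foldl (fun l i => l.set i.toNat (v i)) l
        = (PySem.List.pyRange 0 (M : Int) 1).map v ++ l.drop M := by
  intro M
  induction M with
  | zero => intro _ l hl; simp [PySem.List.pyRange_one_eq_nil]
  | succ M ih =>
    intro hM l hl
    have hcast : ((M + 1 : Nat) : Int) = (M : Int) + 1 := by push_cast; ring
    rw [hcast, PySem.List.pyRange_one_succ_right (by positivity), List.foldl_append,
      List.map_append, ih (by omega) l hl]
    simp only [List.foldl_cons, List.foldl_nil, List.map_cons, List.map_nil, Int.toNat_natCast]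
    have hmapl : ((PySem.List.pyRange 0 (M : Int) 1).map v).length = M := by
      simp [PySem.List.length_pyRange_one]
    rw [List.set_append_right _ _ (by omega)]
    have hdrop : l.drop M = l[M] :: l.drop (M + 1) := List.drop_eq_getElem_cons (by omega)
    rw [hmapl, hdrop]
    rw [show M - M = 0 by omega, List.set_cons_zero, List.append_assoc]
    rfl

theorem pvInnerSet {α : Type} (js : List Int) (i : Nat) (g : Int → α) :
    ∀ (mat : List (List α)), i < mat.length →
      js.foldl (fun mat j => mat.set i ((mat.getD i []).set j.toNat (g j))) mat
        = mat.set i (js.foldl (fun row j => row.set j.toNat (g j)) (mat.getD i [])) := by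
  induction js with
  | nil =>
    intro mat hi
    simp only [List.foldl_nil]
    rw [List.getD_eq_getElem mat [] hi, List.set_getElem_self]
  | cons j js ih =>
    intro mat hi
    simp only [List.foldl_cons]
    rw [ih _ (by simpa using hi)]
    have hx : (mat.set i ((mat.getD i []).set j.toNat (g j))).getD i []
        = (mat.getD i []).set j.toNat (g j) := by
      rw [List.getD_eq_getElem _ [] (by simpa using hi)]
      exact List.getElem_set_self (by simpa using hi)
    rw [hx, List.set_set]

theorem pvFoldlMatrix {α : Type} (N : Nat) (g : Int → Int → α) :
    ∀ (M : Nat), M ≤ N → ∀ (mat : List (List α)), mat.length = N → (∀ row ∈ mat, row.length = N) →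
      (PySem.List.pyRange 0 (M : Int) 1).foldl (fun mat i =>
          (PySem.List.pyRange 0 (N : Int) 1).foldl (fun mat j =>
            mat.set i.toNat ((mat.getD i.toNat []).set j.toNat (g i j))) mat) mat
        = (PySem.List.pyRange 0 (M : Int) 1).map (fun i => (PySem.List.pyRange 0 (N : Int) 1).map (g i)) ++ mat.drop M := by
  intro M
  induction M with
  | zero => intro _ mat hl _; simp [PySem.List.pyRange_one_eq_nil]
  | succ M ih =>
    intro hM mat hl hrows
    have hcast : ((M + 1 : Nat) : Int) = (M : Int) + 1 := by push_cast; ring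
    rw [hcast, PySem.List.pyRange_one_succ_right (by positivity), List.foldl_append,
      List.map_append, ih (by omega) mat hl hrows]
    simp only [List.foldl_cons, List.foldl_nil, List.map_cons, List.map_nil, Int.toNat_natCast]
    set S := (PySem.List.pyRange 0 (M : Int) 1).map (fun i => (PySem.List.pyRange 0 (N : Int) 1).map (g i)) ++ mat.drop M with hS
    have hmapl : ((PySem.List.pyRange 0 (M : Int) 1).map (fun i => (PySem.List.pyRange 0 (N : Int) 1).map (g i))).length = M := by
      simp [PySem.List.length_pyRange_one]
    have hSlen : S.length = N := by
      rw [hS]; simp [PySem.List.length_pyRange_one]; omega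
    rw [pvInnerSet _ M _ S (by omega)]
    have hgetD : S.getD M [] = mat.getD M [] := by
      rw [hS, List.getD_append_right _ _ _ _ (by omega), hmapl, show M - M = 0 by omega]
      rw [List.getD_eq_getElem _ [] (by simp; omega), List.getD_eq_getElem mat [] (by omega)]
      simp [List.getElem_drop]
    have hmem : mat.getD M [] ∈ mat := by
      rw [List.getD_eq_getElem mat [] (by omega)]; exact List.getElem_mem _
    rw [hgetD, pvFoldlSetRange N (g (M : Int)) N (le_refl N) _ (hrows _ hmem)]
    rw [List.drop_of_length_le (by rw [hrows _ hmem]), List.append_nil]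
    rw [hS, List.set_append_right _ _ (by omega), hmapl]
    have hdrop : mat.drop M = mat.getD M [] :: mat.drop (M + 1) := by
      rw [List.getD_eq_getElem mat [] (by omega)]
      exact List.drop_eq_getElem_cons (by omega)
    rw [hdrop, show M - M = 0 by omega, List.set_cons_zero, List.append_assoc]
    rfl

theorem tukey_eq_map (mt : List (List Int)) (r : Int) (hr : ¬ r ≤ 0) :
    tukey mt r = (PySem.List.pyRange 0 (mt.length : Int) 1).map (fun i =>
      (PySem.List.pyRange 0 (mt.length : Int) 1).map (fun j =>
        pvMedianA (pvClippingVoisin mt i j r))) := by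
  unfold tukey
  rw [if_neg hr]
  simp only []
  have hmat0len : (((PySem.List.pyRange 0 (mt.length : Int) 1).map
      (fun _ => (PySem.List.pyRange 0 (mt.length : Int) 1).map (fun _ => (0 : Int))))).length
      = mt.length := by
    simp [PySem.List.length_pyRange_one]
  rw [pvFoldlMatrix mt.length _ mt.length (le_refl _) _ hmat0len (by
    intro row hrowmem
    rcases List.mem_map.mp hrowmem with ⟨x, _, hx⟩
    rw [← hx]
    simp [PySem.List.length_pyRange_one])]
  rw [List.drop_of_length_le (by rw [hmat0len]), List.append_nil]

theorem tukey_eq_alt (mt : List (List Int)) (r : Int) : tukey mt r = tukey_alt mt r := by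
  by_cases hr0 : r ≤ 0
  · unfold tukey tukey_alt
    rw [if_pos hr0, if_pos hr0]
  · have hr : 1 ≤ r := by omega
    rw [tukey_eq_map mt r hr0]
    unfold tukey_alt
    rw [if_neg hr0]
    apply List.map_congr_left
    intro i hi
    rw [pvRowAlt_eq, pvInnerInv mt r i hr mt.length (le_refl _)]
    apply List.map_congr_left
    intro j hj
    refine pvMedianA_eq_medSorted _ _ ?_ ?_
    · simpa using PySem.List.sorted_pairwise (pvWinL mt (mt.length : Int) i j r) (fun x => x)
    · refine (PySem.List.sorted_perm _ _ _).trans ?_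
      rw [pvClip_eq]
      exact (pvPermSwap _ _ _).symm

-- ===== VERDICT (by name: the statement is the Claim_ definition above) =====
theorem tukey_spec : Claim_equal_tukey := by
  intro mt r _ _
  unfold Spec_tukey
  exact tukey_eq_alt mt r
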